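-- pv_equiv track=rewrite | github.com/qlitre/qlitre-utils | src/qlitreutils/mathematics.py | generate_primes_fast
-- ===== SOURCE A (Python) =====
-- def generate_primes_fast(numbers: list):
--     """数字のリストを受け取り素因数分解リストをyieldして返す"""
--     max_val = max(numbers)
--     data = [0] * (max_val + 1)
--     for i in range(2, max_val + 1):
--         if data[i] != 0:
--             continue
--         for k in range(1, max_val + 1):
--             if i * k < max_val + 1:
--                 if data[i * k] == 0:
--                     data[i * k] = i
--             else:
--                 break
--
--     for num in numbers:
--         primes = []
--         x = num
--         while 1 < x:
--             primes.append(data[x])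
--             x //= data[x]
--         yield primes
-- ===== SOURCE B (Python) =====
-- def generate_primes_fast(numbers: list):
--     """数字のリストを受け取り素因数分解リストをyieldして返す"""
--     for num in numbers:
--         primes = []
--         x = num
--         d = 2
--         while d * d <= x:
--             while x % d == 0:
--                 primes.append(d)
--                 x //= d
--             d += 1
--         if x > 1:
--             primes.append(x)
--         yield primes
-- ===== Notes on version B (the rewrite author's own statement) =====
-- stated objective: simpler
-- what changed: Drops the smallest-prime-factor sieve over range(0, max(numbers)+1) and factorizes each number independently by ascending trial division, so no max() and no shared array are needed.
import Mathlib
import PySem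

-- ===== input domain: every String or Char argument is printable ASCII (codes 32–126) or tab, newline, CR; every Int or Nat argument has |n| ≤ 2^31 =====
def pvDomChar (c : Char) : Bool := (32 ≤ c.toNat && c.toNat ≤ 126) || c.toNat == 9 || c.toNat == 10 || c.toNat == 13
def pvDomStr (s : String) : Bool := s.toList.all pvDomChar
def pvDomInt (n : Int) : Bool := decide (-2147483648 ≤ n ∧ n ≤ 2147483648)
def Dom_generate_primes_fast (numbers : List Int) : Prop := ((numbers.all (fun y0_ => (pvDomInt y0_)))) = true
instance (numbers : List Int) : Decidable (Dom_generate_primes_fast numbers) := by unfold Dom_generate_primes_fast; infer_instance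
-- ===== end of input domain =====

-- B replaces A's smallest-prime-factor sieve by independent trial division of each number
-- (simpler: no max(), no shared array); return-value equivalence on non-empty lists; A raises ValueError on [].


-- ===== PORT A =====
-- inner sieve loop: `for k in range(1, max_val+1): if i*k < max_val+1: (set data[i*k]=i
-- if data[i*k]==0) else: break`; structural recursion over the k-range list models the break.
def pvSieveInner (i maxv : Int) : List Int → List Int → List Int
  | data, [] => data
  | data, k :: ks =>
    if i * k < maxv + 1 then
      pvSieveInner i maxv
        (if PySem.List.pyGetD data (i * k) 0 == 0 then PySem.List.pySetD data (i * k) i else data) ks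
    else data

-- outer sieve loop: `for i in range(2, max_val+1): if data[i] != 0: continue; <inner loop>`
def pvSieveOuter (maxv : Int) (is_ : List Int) (data : List Int) : List Int :=
  is_.foldl (fun data i =>
    if PySem.List.pyGetD data i 0 != 0 then data
    else pvSieveInner i maxv data (PySem.List.pyRange 1 (maxv + 1) 1)) data

-- `while 1 < x: primes.append(data[x]); x //= data[x]`; fuel x.toNat bounds the iteration
-- count (x strictly decreases on every input Pre_ admits).
def pvFactorLoop (data : List Int) : Nat → Int → List Int → List Int
  | 0, _, primes => primes
  | fuel + 1, x, primes =>
    if 1 < x then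
      pvFactorLoop data fuel (PySem.Int.floordiv x (PySem.List.pyGetD data x 0))
        (primes ++ [PySem.List.pyGetD data x 0])
    else primes

def generate_primes_fast (numbers : List Int) : List (List Int) :=
  let max_val := (PySem.List.max? numbers (fun y => y)).getD 0   -- max(numbers); Pre_ excludes []
  let data := PySem.List.pyRepeat [(0 : Int)] (max_val + 1)      -- [0] * (max_val + 1)
  let data := pvSieveOuter max_val (PySem.List.pyRange 2 (max_val + 1) 1) data
  numbers.map (fun num => pvFactorLoop data num.toNat num [])

-- ===== PORT B =====
-- `while x % d == 0: primes.append(d); x //= d`; fuel x.toNat bounds the divisions.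
def pvPeel (d : Int) : Nat → Int → List Int → Int × List Int
  | 0, x, primes => (x, primes)
  | fuel + 1, x, primes =>
    if PySem.Int.mod x d == 0 then pvPeel d fuel (PySem.Int.floordiv x d) (primes ++ [d])
    else (x, primes)

-- `while d*d <= x: <peel d's>; d += 1` then `if 1 < x: primes.append(x)`; fuel bounds the
-- number of d-increments.
def pvTrial : Nat → Int → Int → List Int → List Int
  | 0, x, _, primes => if 1 < x then primes ++ [x] else primes
  | fuel + 1, x, d, primes =>
    if d * d ≤ x then
      pvTrial fuel (pvPeel d x.toNat x primes).1 (d + 1) (pvPeel d x.toNat x primes).2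
    else if 1 < x then primes ++ [x] else primes

def generate_primes_fast_alt (numbers : List Int) : List (List Int) :=
  numbers.map (fun num => pvTrial (num.toNat + 1) num 2 [])

-- ===== PRECONDITION & SPEC =====
-- Pre_ excludes only the empty list, on which A raises ValueError (max() of an empty sequence).
def Pre_generate_primes_fast (numbers : List Int) : Prop := numbers ≠ []
instance (numbers : List Int) : Decidable (Pre_generate_primes_fast numbers) := by unfold Pre_generate_primes_fast; infer_instance
def pvWitness_generate_primes_fast : List Int := [12, 0, -3, 97, 1]

def Spec_generate_primes_fast (numbers : List Int) (out : List (List Int)) : Prop := out = generate_primes_fast_alt numbers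
instance (numbers : List Int) (out : List (List Int)) : Decidable (Spec_generate_primes_fast numbers out) := by unfold Spec_generate_primes_fast; infer_instance

-- ===== CLAIM (what is proved, stated in full; the proofs are below) =====
def Claim_equal_generate_primes_fast : Prop := ∀ (numbers : List Int), Dom_generate_primes_fast numbers → Pre_generate_primes_fast numbers → Spec_generate_primes_fast numbers (generate_primes_fast numbers)

-- ===== LEMMAS AND PROOFS =====

-- the common specification: the ascending prime factorization (empty for x ≤ 1)
def pvFac (x : Int) : List Int := (Nat.primeFactorsList x.toNat).map (Nat.cast : Nat → Int)

-- ---------- generic facts ----------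

theorem pvFac_of_le_one (x : Int) (h : x ≤ 1) : pvFac x = [] := by
  have : x.toNat = 0 ∨ x.toNat = 1 := by omega
  rcases this with h' | h' <;> simp [pvFac, h']

-- peeling a prefix of equal primes off the factor list
theorem pvFacMul (d : Nat) (hd : d.Prime) : ∀ (k n : Nat), 0 < n →
    (∀ p, p.Prime → p ∣ n → d < p) →
    Nat.primeFactorsList (d ^ k * n) = List.replicate k d ++ Nat.primeFactorsList n := by
  intro k
  induction k with
  | zero => intro n _ _; simp
  | succ k ih =>
    intro n hn hp
    have hd2 : 2 ≤ d := hd.two_le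
    have hdk : 2 ≤ d ^ (k + 1) := le_trans hd2 (Nat.le_self_pow (by omega) d)
    have hm2 : 2 ≤ d ^ (k + 1) * n := le_trans hdk (Nat.le_mul_of_pos_right _ hn)
    have hdvd : d ∣ d ^ (k + 1) * n := Dvd.dvd.mul_right (dvd_pow_self d (Nat.succ_ne_zero k)) n
    have hmf : Nat.minFac (d ^ (k + 1) * n) = d := by
      have h1 : Nat.minFac (d ^ (k + 1) * n) ≤ d := Nat.minFac_le_of_dvd hd2 hdvd
      have hpr := Nat.minFac_prime (n := d ^ (k + 1) * n) (by omega)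
      have hdv := Nat.minFac_dvd (d ^ (k + 1) * n)
      rcases (Nat.Prime.dvd_mul hpr).mp hdv with h | h
      · exact Nat.le_antisymm h1 ((Nat.prime_dvd_prime_iff_eq hpr hd).mp (hpr.dvd_of_dvd_pow h)).ge
      · exact absurd (hp _ hpr h) (by omega)
    obtain ⟨m, hm⟩ : ∃ m, d ^ (k + 1) * n = m + 2 := ⟨d ^ (k + 1) * n - 2, by omega⟩
    rw [hm, Nat.primeFactorsList_add_two]
    rw [← hm, hmf]
    have hq : d ^ (k + 1) * n / d = d ^ k * n := by
      rw [pow_succ, mul_comm (d ^ k) d, mul_assoc, Nat.mul_div_cancel_left _ (by omega : 0 < d)]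
    rw [hq, ih n hn hp, List.replicate_succ]
    rfl

-- a number ≥ 2 with no divisor in [2, d) and below d*d is prime
theorem pvPrimeOfNoSmall (x d : Int) (hx : 2 ≤ x) (hd : 2 ≤ d) (hlt : x < d * d)
    (h : ∀ e : Int, 2 ≤ e → e < d → ¬ e ∣ x) : x.toNat.Prime := by
  have hmfd : d ≤ (Nat.minFac x.toNat : Int) := by
    by_contra hc
    push_neg at hc
    have h2 : 2 ≤ (Nat.minFac x.toNat : Int) := by
      exact_mod_cast (Nat.minFac_prime (by omega : x.toNat ≠ 1)).two_le
    refine h _ h2 hc ?_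
    have hcast : ((x.toNat.minFac : Nat) : Int) ∣ ((x.toNat : Nat) : Int) :=
      Int.natCast_dvd_natCast.mpr (Nat.minFac_dvd x.toNat)
    rwa [Int.toNat_of_nonneg (by omega)] at hcast
  by_contra hnp
  have hsq := Nat.minFac_sq_le_self (n := x.toNat) (by omega) hnp
  rw [pow_two] at hsq
  have hle : (x.toNat.minFac : Int) * (x.toNat.minFac : Int) ≤ ((x.toNat : Nat) : Int) := by
    exact_mod_cast hsq
  rw [Int.toNat_of_nonneg (by omega : (0:Int) ≤ x)] at hle
  nlinarith [hmfd, hle]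

-- the smallest divisor d ≥ 2 of x is x's least prime factor
theorem pvMinFacEq (x d : Int) (hx : 2 ≤ x) (hd : 2 ≤ d)
    (h : ∀ e : Int, 2 ≤ e → e < d → ¬ e ∣ x) (hdvd : d ∣ x) :
    x.toNat.minFac = d.toNat ∧ d.toNat.Prime := by
  have hdvdN : d.toNat ∣ x.toNat := by
    have : ((d.toNat : Nat) : Int) ∣ ((x.toNat : Nat) : Int) := by
      rw [Int.toNat_of_nonneg (by omega : (0:Int) ≤ d), Int.toNat_of_nonneg (by omega : (0:Int) ≤ x)]
      exact hdvd
    exact_mod_cast this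
  have h1 : x.toNat.minFac ≤ d.toNat := Nat.minFac_le_of_dvd (by omega) hdvdN
  have h2 : d ≤ (x.toNat.minFac : Int) := by
    by_contra hc
    push_neg at hc
    have h2' : 2 ≤ (Nat.minFac x.toNat : Int) := by
      exact_mod_cast (Nat.minFac_prime (by omega : x.toNat ≠ 1)).two_le
    refine h _ h2' hc ?_
    have hcast : ((x.toNat.minFac : Nat) : Int) ∣ ((x.toNat : Nat) : Int) :=
      Int.natCast_dvd_natCast.mpr (Nat.minFac_dvd x.toNat)
    rwa [Int.toNat_of_nonneg (by omega)] at hcast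
  have heq : x.toNat.minFac = d.toNat := by omega
  exact ⟨heq, heq ▸ Nat.minFac_prime (by omega : x.toNat ≠ 1)⟩

-- pvFac peels its least prime factor
theorem pvFac_cons (x : Int) (hx : 2 ≤ x) :
    pvFac x = (x.toNat.minFac : Int) :: pvFac ((x.toNat / x.toNat.minFac : Nat) : Int) := by
  obtain ⟨m, hm⟩ : ∃ m, x.toNat = m + 2 := ⟨x.toNat - 2, by omega⟩
  unfold pvFac
  rw [hm, Nat.primeFactorsList_add_two, ← hm, Int.toNat_natCast]
  simp [hm]

-- ---------- B: trial division computes pvFac ----------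

theorem pvPeel_spec (d : Int) (hd : 2 ≤ d) : ∀ (fuel : Nat) (x : Int) (primes : List Int),
    1 ≤ x → x.toNat ≤ fuel →
    ∃ (k : Nat) (x' : Int), pvPeel d fuel x primes = (x', primes ++ List.replicate k d) ∧
      x = x' * d ^ k ∧ 1 ≤ x' ∧ ¬ (d ∣ x') := by
  intro fuel
  induction fuel with
  | zero => intro x primes hx hf; omega
  | succ n ih =>
    intro x primes hx hf
    rw [pvPeel]
    by_cases hdvd : d ∣ x
    · have hmod : PySem.Int.mod x d = 0 := (PySem.Int.mod_eq_zero_iff_dvd x d).mpr hdvd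
      simp only [hmod, beq_self_eq_true, if_true]
      have hfd : PySem.Int.floordiv x d = x / d := PySem.Int.floordiv_eq_ediv_of_pos (by omega)
      have hdx : d ≤ x := Int.le_of_dvd (by omega) hdvd
      have hx1 : 1 ≤ x / d := by rw [Int.le_ediv_iff_mul_le (by omega : (0:Int) < d)]; omega
      have hxc : x / d * d = x := Int.ediv_mul_cancel hdvd
      have hlt : x / d < x := by nlinarith [hx1, hxc, hd]
      obtain ⟨k, x', heq, hmul, hx', hnd⟩ := ih (x / d) (primes ++ [d]) hx1 (by omega)
      refine ⟨k + 1, x', ?_, ?_, hx', hnd⟩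
      · rw [hfd, heq, List.replicate_succ, List.append_assoc]; rfl
      · rw [pow_succ]
        calc x = x / d * d := hxc.symm
        _ = x' * d ^ k * d := by rw [hmul]
        _ = x' * (d ^ k * d) := by ring
    · have hmod : PySem.Int.mod x d ≠ 0 := fun h => hdvd ((PySem.Int.mod_eq_zero_iff_dvd x d).mp h)
      simp only [beq_iff_eq, hmod, if_false]
      exact ⟨0, x, by simp, by simp, hx, hdvd⟩

theorem pvTerminal (x d : Int) (primes : List Int) (hd : 2 ≤ d) (hx : 1 ≤ x)
    (h : ∀ e : Int, 2 ≤ e → e < d → ¬ e ∣ x) (hbig : x < d * d) :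
    (if 1 < x then primes ++ [x] else primes) = primes ++ pvFac x := by
  by_cases h1 : 1 < x
  · rw [if_pos h1]
    have hp := pvPrimeOfNoSmall x d (by omega) hd hbig h
    have : pvFac x = [x] := by
      unfold pvFac
      rw [Nat.primeFactorsList_prime hp]
      simp [Int.toNat_of_nonneg (by omega : (0:Int) ≤ x)]
    rw [this]
  · rw [if_neg h1, pvFac_of_le_one x (by omega)]
    simp

theorem pvTrial_spec : ∀ (fuel : Nat) (x d : Int) (primes : List Int),
    2 ≤ d → 1 ≤ x → (∀ e : Int, 2 ≤ e → e < d → ¬ e ∣ x) →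
    x.toNat + 2 ≤ fuel + d.toNat →
    pvTrial fuel x d primes = primes ++ pvFac x := by
  intro fuel
  induction fuel with
  | zero =>
    intro x d primes hd hx h hfuel
    rw [pvTrial]
    have hxd : x + 2 ≤ d := by omega
    have h2d : d * 2 ≤ d * d := mul_le_mul_of_nonneg_left hd (by omega)
    have hbig : x < d * d := by linarith
    exact pvTerminal x d primes hd hx h hbig
  | succ n ih =>
    intro x d primes hd hx h hfuel
    rw [pvTrial]
    by_cases hdd : d * d ≤ x
    · rw [if_pos hdd]
      obtain ⟨k, x', hpeel, hmul, hx', hnd'⟩ :=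
        pvPeel_spec d hd x.toNat x primes (by omega) le_rfl
      rw [hpeel]
      cases k with
      | zero =>
        have hxx : x' = x := by rw [hmul]; ring
        show pvTrial n x' (d + 1) (primes ++ List.replicate 0 d) = primes ++ pvFac x
        rw [List.replicate_zero, List.append_nil, hxx]
        refine ih x (d + 1) primes (by omega) hx ?_ (by omega)
        intro e he2 helt hedvd
        by_cases hed : e = d
        · subst hed; rw [← hxx] at hedvd; exact hnd' hedvd
        · exact h e he2 (by omega) hedvd
      | succ k =>
        show pvTrial n x' (d + 1) (primes ++ List.replicate (k + 1) d) = primes ++ pvFac x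
        have hddvd : d ∣ x := ⟨x' * d ^ k, by rw [hmul, pow_succ]; ring⟩
        have hx2 : 2 ≤ x := by nlinarith [hd]
        obtain ⟨hmf, hdp⟩ := pvMinFacEq x d hx2 hd h hddvd
        have hdpow : (1:Int) ≤ d ^ (k + 1) := one_le_pow₀ (by omega)
        have hx'le : x' ≤ x := by nlinarith [hx', hdpow, hmul]
        have hx'dvd : x' ∣ x := ⟨d ^ (k + 1), hmul⟩
        have hnds : ∀ e : Int, 2 ≤ e → e < d + 1 → ¬ e ∣ x' := by
          intro e he2 helt hedvd
          by_cases hed : e = d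
          · subst hed; exact hnd' hedvd
          · exact h e he2 (by omega) (hedvd.trans hx'dvd)
        have hrec := ih x' (d + 1) (primes ++ List.replicate (k + 1) d) (by omega) hx' hnds
          (by omega)
        rw [hrec]
        have hxN : x.toNat = d.toNat ^ (k + 1) * x'.toNat := by
          have hcast : x = ((d.toNat ^ (k + 1) * x'.toNat : Nat) : Int) := by
            push_cast
            rw [Int.toNat_of_nonneg (by omega : (0:Int) ≤ d),
                Int.toNat_of_nonneg (by omega : (0:Int) ≤ x')]
            rw [hmul]; ring
          rw [hcast, Int.toNat_natCast]
        have hbigp : ∀ p, p.Prime → p ∣ x'.toNat → d.toNat < p := by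
          intro p hp hpdvd
          have hpdvdI : (p : Int) ∣ x' := by
            have := Int.natCast_dvd_natCast.mpr hpdvd
            rwa [Int.toNat_of_nonneg (by omega : (0:Int) ≤ x')] at this
          have hp2 : (2:Int) ≤ (p : Int) := by exact_mod_cast hp.two_le
          by_contra hc
          push_neg at hc
          have hple : (p : Int) ≤ d := by
            have h' : ((p : Nat) : Int) ≤ ((d.toNat : Nat) : Int) := by exact_mod_cast hc
            rwa [Int.toNat_of_nonneg (by omega : (0:Int) ≤ d)] at h'
          rcases lt_or_eq_of_le hple with hlt | heq
          · exact h _ hp2 hlt (hpdvdI.trans hx'dvd)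
          · exact hnd' (heq ▸ hpdvdI)
        have h1 := pvFacMul d.toNat hdp (k + 1) x'.toNat (by omega) hbigp
        have hfacx : pvFac x = List.replicate (k + 1) d ++ pvFac x' := by
          unfold pvFac
          rw [hxN, h1]
          rw [List.map_append, List.map_replicate]
          rw [Int.toNat_of_nonneg (by omega : (0:Int) ≤ d)]
        rw [hfacx, List.append_assoc]
    · rw [if_neg hdd]
      exact pvTerminal x d primes hd hx h (by omega)

theorem pvB_eq_fac (num : Int) : pvTrial (num.toNat + 1) num 2 [] = pvFac num := by
  by_cases h1 : 1 ≤ num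
  · have := pvTrial_spec (num.toNat + 1) num 2 [] (by omega) h1
      (fun e he2 helt => absurd he2 (by omega)) (by omega)
    simpa using this
  · have ht : num.toNat = 0 := by omega
    rw [ht]
    rw [pvTrial]
    rw [if_neg (by omega : ¬ (2:Int) * 2 ≤ num), if_neg (by omega : ¬ (1:Int) < num)]
    rw [pvFac_of_le_one num (by omega)]

-- ---------- A: the sieve array holds least prime factors ----------

-- effect of the inner loop: every still-zero multiple i*k (k ≥ a) up to maxv is set to i
theorem pvInner_spec (i maxv : Int) (hi : 2 ≤ i) :
    ∀ (n : Nat) (a : Int), 1 ≤ a → (maxv + 1 - a).toNat = n →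
    ∀ (data : List Int), data.length = (maxv + 1).toNat →
    (pvSieveInner i maxv data (PySem.List.pyRange a (maxv + 1) 1)).length = data.length ∧
    ∀ j : Nat,
      PySem.List.pyGetD (pvSieveInner i maxv data (PySem.List.pyRange a (maxv + 1) 1)) (j : Int) 0 =
        if PySem.List.pyGetD data (j : Int) 0 = 0 ∧ i ∣ (j : Int) ∧ i * a ≤ (j : Int) ∧ (j : Int) ≤ maxv
        then i else PySem.List.pyGetD data (j : Int) 0 := by
  intro n
  induction n with
  | zero =>
    intro a ha hn data hlen
    rw [PySem.List.pyRange_one_eq_nil (by omega : maxv + 1 ≤ a)]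
    refine ⟨rfl, fun j => ?_⟩
    rw [if_neg]
    · rfl
    · rintro ⟨-, -, h3, h4⟩
      have haM : maxv + 1 ≤ a := by omega
      have haa : a ≤ i * a := le_mul_of_one_le_left (by omega) (by omega)
      linarith
  | succ n ih =>
    intro a ha hn data hlen
    have hab : a < maxv + 1 := by omega
    rw [PySem.List.pyRange_one_cons hab]
    by_cases hbreak : i * a < maxv + 1
    · rw [show pvSieveInner i maxv data (a :: PySem.List.pyRange (a + 1) (maxv + 1) 1) =
            pvSieveInner i maxv
              (if PySem.List.pyGetD data (i * a) 0 == 0 then PySem.List.pySetD data (i * a) i else data)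
              (PySem.List.pyRange (a + 1) (maxv + 1) 1) from by
        rw [pvSieveInner, if_pos hbreak]]
      set data' := (if PySem.List.pyGetD data (i * a) 0 == 0 then PySem.List.pySetD data (i * a) i else data) with hdata'
      have hlen' : data'.length = data.length := by
        rw [hdata']; split
        · exact PySem.List.length_pySetD data (i * a) i
        · rfl
      obtain ⟨ihlen, ihget⟩ := ih (a + 1) (by omega) (by omega) data' (hlen'.trans hlen)
      refine ⟨ihlen.trans hlen', fun j => ?_⟩
      have hia0 : (0:Int) ≤ i * a := by positivity
      have hianat : i * a = (((i * a).toNat : Nat) : Int) := by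
        rw [Int.toNat_of_nonneg hia0]
      have htlt : (i * a).toNat < data.length := by
        rw [hlen]; omega
      have hget' : ∀ m : Nat, PySem.List.pyGetD data' (m : Int) 0 =
          if PySem.List.pyGetD data (i * a) 0 = 0 ∧ m = (i * a).toNat then i
          else PySem.List.pyGetD data (m : Int) 0 := by
        intro m
        rw [hdata']
        by_cases hz : PySem.List.pyGetD data (i * a) 0 = 0
        · rw [if_pos (by simpa using hz)]
          have hset := PySem.List.pyGetD_pySetD_natCast data (i * a).toNat m i 0 htlt
          rw [← hianat] at hset
          rw [hset]
          by_cases hm : m = (i * a).toNat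
          · rw [if_pos hm, if_pos ⟨hz, hm⟩]
          · rw [if_neg hm, if_neg (fun hcon => hm hcon.2)]
        · rw [if_neg (by simpa using hz), if_neg (fun hcon => hz hcon.1)]
      rw [ihget j]
      by_cases hj : (j : Int) = i * a
      · have hjt : j = (i * a).toNat := by omega
        have hnogo : ¬ i * (a + 1) ≤ (j : Int) := by
          rw [hj]; intro hcon; nlinarith [hi, ha]
        rw [if_neg (fun hcon => hnogo hcon.2.2.1)]
        rw [hget' j]
        have hjj : PySem.List.pyGetD data ((j : Nat) : Int) 0 = PySem.List.pyGetD data (i * a) 0 := by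
          rw [hj]
        by_cases hz : PySem.List.pyGetD data (i * a) 0 = 0
        · rw [if_pos ⟨hz, hjt⟩, if_pos ⟨hjj.trans hz, ⟨a, hj⟩, le_of_eq hj.symm,
            by rw [hj]; linarith [hbreak]⟩]
        · rw [if_neg (fun hcon => hz hcon.1),
            if_neg (fun hcon => hz (hjj.symm.trans hcon.1))]
      · have hjt : j ≠ (i * a).toNat := by omega
        have hd'j : PySem.List.pyGetD data' ((j : Nat) : Int) 0 = PySem.List.pyGetD data ((j : Nat) : Int) 0 := by
          rw [hget' j, if_neg (fun hcon => hjt hcon.2)]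
        rw [hd'j]
        by_cases hcond : PySem.List.pyGetD data ((j : Nat) : Int) 0 = 0 ∧ i ∣ (j : Int) ∧ i * a ≤ (j : Int) ∧ (j : Int) ≤ maxv
        · obtain ⟨h0, hdvd, hlo, hhi⟩ := hcond
          obtain ⟨c, hc⟩ := hdvd
          have hca : a < c := by
            rcases lt_trichotomy a c with h' | h' | h'
            · exact h'
            · exact absurd (by rw [hc, ← h']) hj
            · exfalso
              have hstep : i * (c + 1) ≤ i * a := mul_le_mul_of_nonneg_left (by omega) (by omega)
              nlinarith [hc, hlo, hi, hstep]
          have hup : i * (a + 1) ≤ (j : Int) := by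
            rw [hc]
            exact mul_le_mul_of_nonneg_left (by omega) (by omega)
          rw [if_pos ⟨h0, ⟨c, hc⟩, hup, hhi⟩, if_pos ⟨h0, ⟨c, hc⟩, hlo, hhi⟩]
        · have hcond' : ¬ (PySem.List.pyGetD data ((j : Nat) : Int) 0 = 0 ∧ i ∣ (j : Int) ∧ i * (a + 1) ≤ (j : Int) ∧ (j : Int) ≤ maxv) := by
            rintro ⟨h0, hdvd, hlo, hhi⟩
            have hmono : i * a ≤ i * (a + 1) := mul_le_mul_of_nonneg_left (by omega) (by omega)
            exact hcond ⟨h0, hdvd, le_trans hmono hlo, hhi⟩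
          rw [if_neg hcond', if_neg hcond]
    · rw [show pvSieveInner i maxv data (a :: PySem.List.pyRange (a + 1) (maxv + 1) 1) = data from by
        rw [pvSieveInner, if_neg hbreak]]
      refine ⟨rfl, fun j => ?_⟩
      rw [if_neg]
      rintro ⟨-, -, h3, h4⟩
      have hge : maxv + 1 ≤ i * a := not_lt.mp hbreak
      linarith

-- sieve invariant: after processing 2..i, entry j holds j's least prime factor iff it is ≤ i
def pvInv (maxv i : Int) (data : List Int) : Prop :=
  data.length = (maxv + 1).toNat ∧ ∀ j : Nat, 2 ≤ j → (j : Int) ≤ maxv →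
    PySem.List.pyGetD data (j : Int) 0 =
      if (Nat.minFac j : Int) ≤ i then (Nat.minFac j : Int) else 0

theorem pvOuter_spec (maxv : Int) : ∀ (n : Nat) (a : Int), 2 ≤ a → (maxv + 1 - a).toNat = n →
    ∀ data, pvInv maxv (a - 1) data →
    pvInv maxv maxv (pvSieveOuter maxv (PySem.List.pyRange a (maxv + 1) 1) data) := by
  intro n
  induction n with
  | zero =>
    intro a ha hn data hinv
    rw [PySem.List.pyRange_one_eq_nil (by omega : maxv + 1 ≤ a)]
    simp only [pvSieveOuter, List.foldl_nil]
    refine ⟨hinv.1, fun j h2 hj => ?_⟩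
    rw [hinv.2 j h2 hj]
    have hle : (Nat.minFac j : Int) ≤ (j : Int) := by
      exact_mod_cast Nat.minFac_le (by omega : 0 < j)
    rw [if_pos (by omega), if_pos (by omega)]
  | succ n ih =>
    intro a ha hn data hinv
    have hab : a < maxv + 1 := by omega
    rw [PySem.List.pyRange_one_cons hab]
    simp only [pvSieveOuter, List.foldl_cons]
    have hanat : a = ((a.toNat : Nat) : Int) := by omega
    have hread := hinv.2 a.toNat (by omega) (by omega)
    rw [← hanat] at hread
    have hmf2 : 2 ≤ (Nat.minFac a.toNat : Int) := by
      exact_mod_cast (Nat.minFac_prime (by omega : a.toNat ≠ 1)).two_le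
    by_cases hc : (Nat.minFac a.toNat : Int) ≤ a - 1
    · -- data[a] ≠ 0: a is composite, skip
      have hz' : PySem.List.pyGetD data a 0 ≠ 0 := by rw [hread, if_pos hc]; omega
      rw [if_pos (by simpa using hz')]
      have hinv' : pvInv maxv ((a + 1) - 1) data := by
        refine ⟨hinv.1, fun j h2 hj => ?_⟩
        rw [hinv.2 j h2 hj]
        have hacomp : ¬ a.toNat.Prime := by
          intro hp
          have := (Nat.prime_def_minFac.mp hp).2
          omega
        by_cases hle : (Nat.minFac j : Int) ≤ a - 1
        · rw [if_pos hle, if_pos (by omega)]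
        · rw [if_neg hle, if_neg]
          intro hle'
          have hjp : (Nat.minFac j).Prime := Nat.minFac_prime (by omega : j ≠ 1)
          have heqa : Nat.minFac j = a.toNat := by omega
          exact hacomp (heqa ▸ hjp)
      exact ih (a + 1) (by omega) (by omega) data hinv'
    · -- data[a] = 0: a is prime, run the inner loop
      have hz : PySem.List.pyGetD data a 0 = 0 := by rw [hread, if_neg hc]
      rw [if_neg (by simpa using hz)]
      have hmfle : (Nat.minFac a.toNat : Int) ≤ a := by
        have := Nat.minFac_le (by omega : 0 < a.toNat)
        omega
      have hap : a.toNat.Prime := Nat.prime_def_minFac.mpr ⟨by omega, by omega⟩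
      obtain ⟨slen, sget⟩ :=
        pvInner_spec a maxv (by omega) (maxv + 1 - 1).toNat 1 le_rfl rfl data hinv.1
      have hinv' : pvInv maxv ((a + 1) - 1)
          (pvSieveInner a maxv data (PySem.List.pyRange 1 (maxv + 1) 1)) := by
        refine ⟨slen.trans hinv.1, fun j h2 hj => ?_⟩
        rw [sget j, hinv.2 j h2 hj]
        have hjmf2 : 2 ≤ (Nat.minFac j : Int) := by
          exact_mod_cast (Nat.minFac_prime (by omega : j ≠ 1)).two_le
        by_cases hle : (Nat.minFac j : Int) ≤ a - 1
        · rw [if_neg (by rintro ⟨h0, -⟩; rw [if_pos hle] at h0; omega),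
            if_pos hle, if_pos (by omega)]
        · by_cases heq : (Nat.minFac j : Int) = a
          · have hdvd : a ∣ (j : Int) := by
              rw [← heq]
              exact_mod_cast Int.natCast_dvd_natCast.mpr (Nat.minFac_dvd j)
            have hlej : a ≤ (j : Int) := by
              have := Nat.minFac_le (by omega : 0 < j)
              omega
            rw [if_pos ⟨by rw [if_neg hle], hdvd, by rw [mul_one]; exact hlej, hj⟩,
              if_pos (by omega), heq]
          · have hgt : a < (Nat.minFac j : Int) := by omega
            have hnd : ¬ a ∣ (j : Int) := by
              intro hdvd
              have hdvdN : a.toNat ∣ j := by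
                have h' : ((a.toNat : Nat) : Int) ∣ ((j : Nat) : Int) := by
                  rw [← hanat]; exact hdvd
                exact_mod_cast h'
              have := Nat.minFac_le_of_dvd (by omega : 2 ≤ a.toNat) hdvdN
              omega
            rw [if_neg (by rintro ⟨-, hdvd, -⟩; exact hnd hdvd), if_neg hle,
              if_neg (by omega)]
      exact ih (a + 1) (by omega) (by omega) _ hinv'

-- the factorization loop of A under the completed sieve
theorem pvFactor_spec (maxv : Int) (data : List Int) (hinv : pvInv maxv maxv data) :
    ∀ (fuel : Nat) (x : Int) (primes : List Int), x ≤ maxv → x.toNat ≤ fuel →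
    pvFactorLoop data fuel x primes = primes ++ pvFac x := by
  intro fuel
  induction fuel with
  | zero =>
    intro x primes hx hf
    rw [pvFactorLoop, pvFac_of_le_one x (by omega)]
    simp
  | succ n ih =>
    intro x primes hx hf
    rw [pvFactorLoop]
    by_cases h1 : 1 < x
    · rw [if_pos h1]
      have hxnat : x = ((x.toNat : Nat) : Int) := by omega
      have hr := hinv.2 x.toNat (by omega) (by omega)
      rw [← hxnat] at hr
      have hmfle : x.toNat.minFac ≤ x.toNat := Nat.minFac_le (by omega)
      have hd : PySem.List.pyGetD data x 0 = (Nat.minFac x.toNat : Int) := by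
        rw [hr, if_pos (by omega)]
      have hmf1 : 1 < x.toNat.minFac := (Nat.minFac_prime (by omega : x.toNat ≠ 1)).one_lt
      have hdiv : PySem.Int.floordiv x (PySem.List.pyGetD data x 0) =
          ((x.toNat / x.toNat.minFac : Nat) : Int) := by
        rw [hd, hxnat]
        exact_mod_cast PySem.Int.floordiv_natCast x.toNat x.toNat.minFac
      have hlt : x.toNat / x.toNat.minFac < x.toNat := Nat.div_lt_self (by omega) hmf1
      rw [hdiv, hd, ih _ (primes ++ [(Nat.minFac x.toNat : Int)]) (by omega)
        (by rw [Int.toNat_natCast]; omega)]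
      rw [pvFac_cons x (by omega)]
      simp
    · rw [if_neg h1, pvFac_of_le_one x (by omega)]
      simp

theorem pvA_eq_fac (numbers : List Int) (h : numbers ≠ []) :
    generate_primes_fast numbers = numbers.map pvFac := by
  obtain ⟨m, hm⟩ : ∃ m, PySem.List.max? numbers (fun y => y) = some m := by
    cases hmax : PySem.List.max? numbers (fun y => y) with
    | none => exact absurd ((PySem.List.max?_eq_none_iff numbers _).mp hmax) h
    | some m => exact ⟨m, rfl⟩
  have hismax := PySem.List.max?_isMax hm
  unfold generate_primes_fast
  rw [hm]
  simp only [Option.getD_some]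
  have hinv0 : pvInv m 1 (PySem.List.pyRepeat [(0:Int)] (m + 1)) := by
    rw [PySem.List.pyRepeat_singleton]
    refine ⟨List.length_replicate, fun j h2 hj => ?_⟩
    have hget : PySem.List.pyGetD (List.replicate (m + 1).toNat (0:Int)) (j : Int) 0 = 0 := by
      rw [PySem.List.pyGetD_natCast]
      rcases lt_or_ge j (m + 1).toNat with hlt | hge
      · rw [List.getD_eq_getElem _ _ (by simpa using hlt)]
        simp
      · rw [List.getD_eq_default _ _ (by simpa using hge)]
    rw [hget, if_neg]
    have : 2 ≤ (Nat.minFac j : Int) := by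
      exact_mod_cast (Nat.minFac_prime (by omega : j ≠ 1)).two_le
    omega
  have hinv1 : pvInv m (2 - 1) (PySem.List.pyRepeat [(0:Int)] (m + 1)) := by
    rwa [show (2:Int) - 1 = 1 by norm_num]
  have hinv := pvOuter_spec m (m + 1 - 2).toNat 2 (by omega) rfl _ hinv1
  apply List.map_congr_left
  intro num hnum
  have := pvFactor_spec m _ hinv num.toNat num [] (hismax num hnum) le_rfl
  simpa using this

-- ===== VERDICT (by name: the statement is the Claim_ definition above) =====
theorem generate_primes_fast_spec : Claim_equal_generate_primes_fast := by
  intro numbers _ hpre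
  unfold Spec_generate_primes_fast
  rw [pvA_eq_fac numbers hpre]
  unfold generate_primes_fast_alt
  exact List.map_congr_left (fun num _ => (pvB_eq_fac num).symm)
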